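-- pv_equiv track=rewrite | github.com/MrBrantCode/unitest_baseline | mut_generate/mist_train_cf/cf_89604/solution.py | bitwise_and_count
-- ===== SOURCE A (Python) =====
-- def bitwise_and_count(num1, num2):
--     bitwise_and = num1 & num2
--     count = 0
--     while bitwise_and > 0:
--         if bitwise_and & 1:
--             count += 1
--         bitwise_and = bitwise_and >> 1
--     return count
-- ===== SOURCE B (Python) =====
-- def bitwise_and_count(num1, num2):
--     n = num1 & num2
--     return bin(max(n, 0)).count('1')
-- ===== Notes on version B (the rewrite author's own statement) =====
-- stated objective: idiomatic
-- what changed: Replaces A's explicit shift-and-test loop with the idiomatic one-liner: clamp the AND to non-negative, render it in binary with bin(), and count '1' characters (a string-representation pass instead of a bit-shifting loop).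
import Mathlib
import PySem

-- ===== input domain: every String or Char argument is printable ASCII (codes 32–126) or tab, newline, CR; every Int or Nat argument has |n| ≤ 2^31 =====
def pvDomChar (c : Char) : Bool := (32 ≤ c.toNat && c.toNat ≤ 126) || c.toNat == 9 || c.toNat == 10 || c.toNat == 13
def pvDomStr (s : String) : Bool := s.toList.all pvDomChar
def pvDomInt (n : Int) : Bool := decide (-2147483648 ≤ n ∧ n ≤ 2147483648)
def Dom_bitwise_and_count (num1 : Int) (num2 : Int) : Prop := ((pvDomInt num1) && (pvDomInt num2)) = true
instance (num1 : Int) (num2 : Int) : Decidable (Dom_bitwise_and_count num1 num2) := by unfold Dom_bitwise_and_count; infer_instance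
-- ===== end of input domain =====

-- Header: B replaces A's shift-and-test loop with the idiomatic bin(max(n,0)).count('1') one-liner (same results, no speed claim).
-- ===== PORT A =====
-- A's while loop: shift right, test low bit, until the value is no longer positive.
def goA (n : Int) (count : Int) : Int :=
  if _h : n > 0 then
    goA (Int.shiftRight n 1) (if Int.land n 1 ≠ 0 then count + 1 else count)
  else count
termination_by n.toNat
decreasing_by
  obtain ⟨m, rfl⟩ : ∃ m : Nat, n = (m : Int) := ⟨n.toNat, by omega⟩
  have h2 : Int.shiftRight (m : Int) 1 = ((m >>> 1 : Nat) : Int) := rfl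
  have h3 : m >>> 1 = m / 2 := Nat.shiftRight_one m
  simp only [h2, h3]
  omega

def bitwise_and_count (num1 : Int) (num2 : Int) : Int :=
  goA (Int.land num1 num2) 0

-- ===== PORT B =====
-- Python's bin(m) for m ≥ 0 is "0b" ++ binary digits (bin(0) = "0b0"); binChars builds the digit part.
def binChars (m : Nat) : List Char :=
  if _h : m = 0 then [] else binChars (m / 2) ++ [if m % 2 = 1 then '1' else '0']
termination_by m
decreasing_by omega

def binStr (m : Nat) : List Char :=
  ['0', 'b'] ++ (if m = 0 then ['0'] else binChars m)

def bitwise_and_count_alt (num1 : Int) (num2 : Int) : Int :=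
  let n := Int.land num1 num2
  ((binStr (max n 0).toNat).count '1' : Nat)

-- ===== PRECONDITION & SPEC =====
def Spec_bitwise_and_count (num1 : Int) (num2 : Int) (out : Int) : Prop := out = bitwise_and_count_alt num1 num2
instance (num1 : Int) (num2 : Int) (out : Int) : Decidable (Spec_bitwise_and_count num1 num2 out) := by unfold Spec_bitwise_and_count; infer_instance

-- ===== CLAIM =====
def Claim_equal_bitwise_and_count : Prop := ∀ (num1 : Int) (num2 : Int), Dom_bitwise_and_count num1 num2 → Spec_bitwise_and_count num1 num2 (bitwise_and_count num1 num2)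

-- ===== LEMMAS AND PROOFS =====

-- number of set bits of a natural number
def bits (m : Nat) : Nat :=
  if m = 0 then 0 else m % 2 + bits (m / 2)
termination_by m
decreasing_by omega

theorem bits_zero : bits 0 = 0 := by unfold bits; simp

theorem bits_pos (m : Nat) (h : m ≠ 0) : bits m = m % 2 + bits (m / 2) := by
  rw [bits]; simp [h]

theorem count1_binChars (m : Nat) : (binChars m).count '1' = bits m := by
  induction m using Nat.strong_induction_on with
  | _ m ih =>
    rcases Nat.eq_zero_or_pos m with hz | hp
    · subst hz; rw [binChars, bits_zero]; simp
    · rw [binChars, dif_neg (by omega : ¬ m = 0), bits_pos m (by omega),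
        List.count_append, ih (m / 2) (by omega)]
      rcases Nat.even_or_odd m with ⟨k, hk⟩ | ⟨k, hk⟩
      · have h1 : m % 2 = 0 := by omega
        simp [h1]
      · have h1 : m % 2 = 1 := by omega
        simp [h1]; omega

theorem count1_binStr (m : Nat) : (binStr m).count '1' = bits m := by
  unfold binStr
  rcases Nat.eq_zero_or_pos m with hz | hp
  · subst hz; rw [bits_zero]; simp
  · rw [if_neg (by omega : ¬ m = 0)]
    simp [count1_binChars]

theorem goA_nat (m : Nat) : ∀ c : Int, goA (m : Int) c = c + bits m := by
  induction m using Nat.strong_induction_on with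
  | _ m ih =>
    intro c
    rcases Nat.eq_zero_or_pos m with hz | hp
    · subst hz; rw [goA, bits_zero]; simp
    · rw [goA]
      have hpos : (m : Int) > 0 := by exact_mod_cast hp
      have hshift : Int.shiftRight (m : Int) 1 = ((m / 2 : Nat) : Int) := by
        have : Int.shiftRight (m : Int) 1 = ((m >>> 1 : Nat) : Int) := rfl
        rw [this, Nat.shiftRight_one]
      have hland : Int.land (m : Int) 1 = ((m &&& 1 : Nat) : Int) := rfl
      have hmod : m &&& 1 = m % 2 := Nat.and_one_is_mod m
      rw [dif_pos hpos, hshift, ih (m / 2) (by omega), bits_pos m (by omega)]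
      rw [hland, hmod]
      rcases Nat.even_or_odd m with ⟨k, hk⟩ | ⟨k, hk⟩
      · have h1 : m % 2 = 0 := by omega
        rw [h1]; simp
      · have h1 : m % 2 = 1 := by omega
        rw [h1]; simp; omega

theorem goA_nonpos (n c : Int) (h : ¬ n > 0) : goA n c = c := by
  rw [goA, dif_neg h]

-- ===== VERDICT =====
theorem bitwise_and_count_spec : Claim_equal_bitwise_and_count := by
  intro num1 num2 _hdom
  unfold Spec_bitwise_and_count bitwise_and_count bitwise_and_count_alt
  by_cases h : Int.land num1 num2 > 0
  · obtain ⟨m, hm⟩ : ∃ m : Nat, Int.land num1 num2 = (m : Int) := ⟨(Int.land num1 num2).toNat, by omega⟩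
    have hmax : (max (Int.land num1 num2) 0).toNat = m := by omega
    rw [hm, goA_nat]
    simp only [hmax, count1_binStr]
    simp
  · have hmax : (max (Int.land num1 num2) 0).toNat = 0 := by omega
    rw [goA_nonpos _ _ h]
    simp only [hmax, count1_binStr, bits_zero]
    simp
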